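-- pv_equiv track=rewrite | github.com/Benjamin7991/My-Code-Wars-Solutions | 7KYU/Weird_Words.py | next_letter
-- ===== SOURCE A (Python) =====
-- def next_letter(s):
--     al = 'abcdefghijklmnopqrstuvwxyz'
--     cap = 'ABCDEFGHIJKLMNOPQRSTUVWXYZ'
--     result = []
--
--     for char in s:
--         if char.lower():
--             if char in al:
--                 i = al.index(char)
--                 new_i = al[(i+1) % 26]
--                 result.append(new_i)
--         if char.upper():
--             if char in cap:
--                 i = cap.index(char)
--                 new_i = cap[(i+1) % 26]
--                 result.append(new_i)
--
--         if not char.isalpha():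
--             result.append(char)
--     return ''.join(result)
-- ===== SOURCE B (Python) =====
-- def next_letter(s):
--     lo = 'abcdefghijklmnopqrstuvwxyz'
--     up = lo.upper()
--     return s.translate(str.maketrans(lo + up, lo[1:] + lo[:1] + up[1:] + up[:1]))
-- ===== Notes on version B (the rewrite author's own statement) =====
-- stated objective: idiomatic
-- what changed: Replaces the per-character branch-and-index loop (with its redundant truthy lower()/upper() guards and linear .index scans) by one precomputed str.maketrans successor table applied with s.translate in a single table-driven pass.
import Mathlib
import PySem

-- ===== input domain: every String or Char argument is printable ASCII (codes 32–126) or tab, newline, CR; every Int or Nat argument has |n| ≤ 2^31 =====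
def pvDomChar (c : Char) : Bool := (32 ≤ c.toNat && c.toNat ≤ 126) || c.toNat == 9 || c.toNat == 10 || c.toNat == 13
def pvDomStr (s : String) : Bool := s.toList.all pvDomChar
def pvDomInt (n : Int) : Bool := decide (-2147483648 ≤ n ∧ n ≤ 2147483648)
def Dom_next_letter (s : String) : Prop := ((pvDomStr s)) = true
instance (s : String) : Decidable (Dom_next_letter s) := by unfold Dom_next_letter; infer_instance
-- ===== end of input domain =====

-- B replaces A's per-character branch/index loop by one precomputed successor
-- translation table applied in a single table-driven pass (same cost, more idiomatic).

-- ===== PORT A =====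
def pvAl : List Char := "abcdefghijklmnopqrstuvwxyz".toList
def pvCap : List Char := "ABCDEFGHIJKLMNOPQRSTUVWXYZ".toList

-- one iteration of A's loop body: the characters appended to `result` for `char`
def pvStepA (char : Char) : List Char :=
  (if PySem.Str.lower (String.mk [char]) ≠ "" then
     (if char ∈ pvAl then
        match PySem.List.index? pvAl char with
        | some i =>
          match PySem.List.pyGet? pvAl (PySem.Int.mod ((i : Int) + 1) 26) with
          | some newi => [newi]
          | none => []
        | none => []
      else [])
   else [])
  ++
  (if PySem.Str.upper (String.mk [char]) ≠ "" then
     (if char ∈ pvCap then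
        match PySem.List.index? pvCap char with
        | some i =>
          match PySem.List.pyGet? pvCap (PySem.Int.mod ((i : Int) + 1) 26) with
          | some newi => [newi]
          | none => []
        | none => []
      else [])
   else [])
  ++
  (if ¬ (PySem.Chars.isalpha char = true) then [char] else [])

def next_letter (s : String) : String :=
  String.mk (s.toList.foldl (fun result char => result ++ pvStepA char) [])

-- ===== PORT B =====
-- str.maketrans(lo+up, lo[1:]+lo[:1]+up[1:]+up[:1]) as an association table
def pvTable : PySem.Dict Char Char :=
  let lo := "abcdefghijklmnopqrstuvwxyz".toList
  let up := PySem.Chars.upper lo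
  PySem.Dict.ofList
    ((lo ++ up).zip
      (PySem.List.slice lo (some 1) none ++ PySem.List.slice lo none (some 1) ++
       PySem.List.slice up (some 1) none ++ PySem.List.slice up none (some 1)))

-- s.translate: map every char through the table, identity when absent
def next_letter_alt (s : String) : String :=
  String.mk (s.toList.map (fun c => pvTable.getD c c))

-- ===== PRECONDITION & SPEC =====
def Spec_next_letter (s : String) (out : String) : Prop := out = next_letter_alt s
instance (s : String) (out : String) : Decidable (Spec_next_letter s out) := by unfold Spec_next_letter; infer_instance

-- ===== CLAIM (what is proved, stated in full; the proofs are below) =====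
def Claim_equal_next_letter : Prop := ∀ (s : String), Dom_next_letter s → Spec_next_letter s (next_letter s)

-- ===== LEMMAS AND PROOFS =====
set_option maxRecDepth 40000 in
set_option maxHeartbeats 1000000 in
lemma pvStep_eq_nat : ∀ n : Nat, n < 127 →
    pvStepA (Char.ofNat n) = [pvTable.getD (Char.ofNat n) (Char.ofNat n)] := by
  decide

lemma pvStep_eq (c : Char) (h : pvDomChar c = true) :
    pvStepA c = [pvTable.getD c c] := by
  have hle : c.toNat < 127 := by
    simp [pvDomChar] at h
    omega
  have := pvStep_eq_nat c.toNat hle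
  simpa using this

lemma pvFlat (l : List Char) (h : ∀ c ∈ l, pvDomChar c = true) :
    l.flatMap pvStepA = l.map (fun c => pvTable.getD c c) := by
  induction l with
  | nil => rfl
  | cons c t ih =>
    simp only [List.flatMap_cons, List.map_cons]
    rw [pvStep_eq c (h c (List.mem_cons_self)), ih (fun x hx => h x (List.mem_cons_of_mem _ hx))]
    rfl

-- ===== VERDICT (by name: the statement is the Claim_ definition above) =====
theorem next_letter_spec : Claim_equal_next_letter := by
  intro s hdom
  unfold Spec_next_letter next_letter next_letter_alt
  rw [PySem.List.foldl_append_eq_flatMap]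
  rw [pvFlat s.toList (by simpa [Dom_next_letter, pvDomStr, List.all_eq_true] using hdom)]
  rfl
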